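-- pv_equiv track=rewrite | github.com/abeshjha/crack_substitution_cipher | decipher_text.py | convert
-- ===== SOURCE A (Python) =====
-- def convert(word):
--     num = ""
--     for i in range(0,len(word)):
--         num = num + str(i)
--         for k in range(i+1,len(word)):
--             if(word[k] == word[i]):
--                 num = num + str(i)
--     return num
-- ===== SOURCE B (Python) =====
-- def convert(word):
--     # Right-to-left pass: cnt[c] = occurrences of c strictly after index i,
--     # so each piece str(i) * (1 + later duplicates) is built in O(piece) time.
--     cnt = {}
--     parts = []
--     for i in range(len(word) - 1, -1, -1):
--         m = cnt.get(word[i], 0)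
--         parts.append(str(i) * (m + 1))
--         cnt[word[i]] = m + 1
--     parts.reverse()
--     return "".join(parts)
-- ===== Notes on version B (the rewrite author's own statement) =====
-- stated objective: faster
-- what changed: Replaces A's nested loops (a full suffix rescan per position) with a single right-to-left pass keeping a dict of later-duplicate counts, emitting each str(i) run in one step and joining at the end.
import Mathlib
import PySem

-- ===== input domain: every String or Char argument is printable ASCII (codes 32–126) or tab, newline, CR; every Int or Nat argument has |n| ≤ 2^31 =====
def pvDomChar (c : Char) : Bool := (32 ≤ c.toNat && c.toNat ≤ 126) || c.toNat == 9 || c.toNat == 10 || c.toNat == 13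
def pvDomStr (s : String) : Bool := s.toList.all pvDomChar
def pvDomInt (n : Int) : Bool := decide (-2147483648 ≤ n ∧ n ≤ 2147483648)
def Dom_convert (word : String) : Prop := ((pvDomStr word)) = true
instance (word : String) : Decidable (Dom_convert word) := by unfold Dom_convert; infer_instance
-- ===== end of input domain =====

-- B builds each run of repeated indices in one step from a right-to-left duplicate count,
-- instead of A's inner rescan of the whole suffix for every position.

-- ===== PORT A =====
-- literal port of A: nested index loops over the characters, accumulating a char list
def convert (word : String) : String :=
  let cs := word.toList
  let n := cs.length
  String.ofList ((List.range n).foldl (fun num (i : Nat) =>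
    let num := num ++ PySem.Int.toChars (i : Int)
    (List.range' (i + 1) (n - (i + 1))).foldl (fun num k =>
      if cs[k]? = cs[i]? then num ++ PySem.Int.toChars (i : Int) else num) num) [])

-- ===== PORT B =====
-- one step of B's right-to-left loop: read the count of later duplicates, emit the piece, bump the count
def altStep (ic : Char × Nat) (acc : PySem.Dict Char Nat × List Char) :
    PySem.Dict Char Nat × List Char :=
  let m := acc.1.getD ic.1 0
  (acc.1.insert ic.1 (m + 1),
   (List.replicate (m + 1) (PySem.Int.toChars (ic.2 : Int))).flatten ++ acc.2)

-- port of B: a single right-to-left pass (foldr) with a dict of later-duplicate counts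
def convert_alt (word : String) : String :=
  String.ofList (((word.toList.zipIdx 0).foldr altStep (PySem.Dict.empty, [])).2)

-- ===== PRECONDITION & SPEC =====
def Spec_convert (word : String) (out : String) : Prop := out = convert_alt word
instance (word : String) (out : String) : Decidable (Spec_convert word out) := by unfold Spec_convert; infer_instance

-- ===== CLAIM (what is proved, stated in full; the proofs are below) =====
def Claim_equal_convert : Prop := ∀ (word : String), Dom_convert word → Spec_convert word (convert word)

-- ===== LEMMAS AND PROOFS =====

-- common characterisation: the output contributed from position i on, over the remaining chars
def pieces : Nat → List Char → List Char
  | _, [] => []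
  | i, c :: rest =>
      PySem.Int.toChars (i : Int)
        ++ (List.replicate (rest.count c) (PySem.Int.toChars (i : Int))).flatten
        ++ pieces (i + 1) rest

-- A's inner loop over range' a b appends t once per match of ci in the suffix from a
lemma convert_inner (cs : List Char) (ci : Option Char) (t : List Char) :
    ∀ (b a : Nat) (num : List Char), a + b = cs.length →
      (List.range' a b).foldl
          (fun num k => if cs[k]? = ci then num ++ t else num) num
        = num ++ (List.replicate (((cs.drop a).filter (fun c => some c = ci)).length) t).flatten := by
  intro b
  induction b with
  | zero =>
      intro a num h
      simp [List.drop_of_length_le (by omega : cs.length ≤ a)]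
  | succ b ih =>
      intro a num h
      have ha : a < cs.length := by omega
      have hdrop : cs.drop a = cs[a] :: cs.drop (a + 1) :=
        (List.getElem_cons_drop ha).symm
      rw [List.range'_succ, List.foldl_cons]
      simp only [List.getElem?_eq_getElem ha]
      rw [ih (a + 1) _ (by omega), hdrop, List.filter_cons]
      by_cases hc : some cs[a] = ci
      · simp [hc, List.replicate_succ, List.append_assoc]
      · simp [hc]

-- counting a char equals filtering on the option-level equality A's inner test uses
lemma count_eq_filter (rest : List Char) (c : Char) :
    (rest.filter (fun x => some x = some c)).length = rest.count c := by
  rw [List.count_eq_length_filter]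
  congr 1
  apply List.filter_congr
  intro x _
  by_cases hx : x = c <;> simp [hx]

-- A's outer loop from index a produces `pieces a (cs.drop a)`
lemma convert_outer (cs : List Char) :
    ∀ (b a : Nat) (num : List Char), a + b = cs.length →
      (List.range' a b).foldl
          (fun num (i : Nat) =>
            let num := num ++ PySem.Int.toChars (i : Int)
            (List.range' (i + 1) (cs.length - (i + 1))).foldl
              (fun num k =>
                if cs[k]? = cs[i]? then num ++ PySem.Int.toChars (i : Int) else num) num) num
        = num ++ pieces a (cs.drop a) := by
  intro b
  induction b with
  | zero =>
      intro a num h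
      simp [List.drop_of_length_le (by omega : cs.length ≤ a), pieces]
  | succ b ih =>
      intro a num h
      have ha : a < cs.length := by omega
      have hdrop : cs.drop a = cs[a] :: cs.drop (a + 1) :=
        (List.getElem_cons_drop ha).symm
      rw [List.range'_succ, List.foldl_cons]
      simp only
      rw [convert_inner cs cs[a]? (PySem.Int.toChars (a : Int)) (cs.length - (a + 1)) (a + 1)
            (num ++ PySem.Int.toChars (a : Int)) (by omega)]
      rw [ih (a + 1) _ (by omega), hdrop]
      simp only [List.getElem?_eq_getElem ha, count_eq_filter]
      simp [pieces, List.append_assoc]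

-- B's foldr over the indexed suffix returns the duplicate counts of that suffix and `pieces`
lemma alt_go (l : List Char) :
    ∀ (i : Nat),
      (∀ c, ((l.zipIdx i).foldr altStep (PySem.Dict.empty, [])).1.getD c 0 = l.count c) ∧
      ((l.zipIdx i).foldr altStep (PySem.Dict.empty, [])).2 = pieces i l := by
  induction l with
  | nil => intro i; simp [pieces, PySem.Dict.getD, PySem.Dict.empty, PySem.Dict.get?]
  | cons c rest ih =>
      intro i
      obtain ⟨ihd, ihs⟩ := ih (i + 1)
      rw [List.zipIdx_cons, List.foldr_cons]
      constructor
      · intro c'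
        simp only [altStep, PySem.Dict.getD_insert, ihd]
        by_cases hc : c' = c
        · simp [hc]
        · simp [hc, Ne.symm hc]
      · simp only [altStep, ihs, ihd]
        simp [pieces, List.replicate_succ]

-- ===== VERDICT (by name: the statement is the Claim_ definition above) =====
theorem convert_spec : Claim_equal_convert := by
  intro word _
  unfold Spec_convert convert convert_alt
  simp only [List.range_eq_range']
  rw [convert_outer word.toList word.toList.length 0 [] (by omega),
      (alt_go word.toList 0).2]
  simp
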